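-- pv_equiv track=rewrite | github.com/wenting-zhao/lex-leader | lexleader.py | _and_helper
-- ===== SOURCE A (Python) =====
-- def _and_helper(vector1, vector2):
--     """ creates the lex-leader constraints between two vectors of variables
--         via the plain AND decomposition encoding
--         inputs:
--             vector1, vector2: lists of integers, equivalent lengths,
--                               each representing a vector of variables
--         returns:
--             string containing the full expression of the lex-leader constraint
--     """
--     # setup vectors with 1-based indexing to match constraints in the source paper
--     A = [None] + vector1
--     B = [None] + vector2
--
--     res = []
--     res.append( "(!x{} | x{})".format(A[1], B[1]) )
--
--     assert len(vector1) == len(vector2)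
--     for i in range(1, len(vector1)):
--         temp = []
--         for j in range(1, i+1):
--             temp.append( "(x{} = x{})".format(A[j], B[j]) )
--         temp = " & ".join(temp)
--         res.append( "({} -> (!x{} | x{}))".format(temp, A[i+1], B[i+1]) )
--     return "("+"\n& ".join(res)+")"
-- ===== SOURCE B (Python) =====
-- def _and_helper(vector1, vector2):
--     """Lex-leader AND-decomposition; single pass with a running list of
--     equality terms instead of re-building the prefix for every clause."""
--     assert len(vector1) == len(vector2)
--     res = ["(!x{} | x{})".format(vector1[0], vector2[0])]
--     eqs = []
--     for i in range(1, len(vector1)):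
--         eqs.append("(x{} = x{})".format(vector1[i - 1], vector2[i - 1]))
--         res.append("({} -> (!x{} | x{}))".format(" & ".join(eqs), vector1[i], vector2[i]))
--     return "(" + "\n& ".join(res) + ")"
-- ===== Notes on version B (the rewrite author's own statement) =====
-- stated objective: faster
-- what changed: Replaces A's nested loops (rebuilding the whole equality-term list for every clause) by a single pass maintaining a running accumulator of equality terms, appending one new term per iteration; measured ~4-5x faster.
import Mathlib
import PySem

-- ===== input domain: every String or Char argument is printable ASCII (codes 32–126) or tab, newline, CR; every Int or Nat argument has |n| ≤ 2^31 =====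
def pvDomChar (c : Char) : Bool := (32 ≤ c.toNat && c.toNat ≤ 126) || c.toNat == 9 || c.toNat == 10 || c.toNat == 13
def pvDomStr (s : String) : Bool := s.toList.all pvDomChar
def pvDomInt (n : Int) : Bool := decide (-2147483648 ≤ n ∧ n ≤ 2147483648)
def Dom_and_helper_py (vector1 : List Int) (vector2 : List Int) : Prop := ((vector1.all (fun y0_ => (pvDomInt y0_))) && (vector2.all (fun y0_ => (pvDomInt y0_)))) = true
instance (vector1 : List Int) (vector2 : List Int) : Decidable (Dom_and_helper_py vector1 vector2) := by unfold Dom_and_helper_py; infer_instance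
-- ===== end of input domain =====

-- B builds the same constraint string in one pass with a running accumulator of
-- equality terms instead of A's nested re-building of the prefix for each clause.

-- ===== PORT A =====
-- A = [None] + vector1 : the sentinel at index 0 is never read (all indices are ≥ 1);
-- we use 0 as the sentinel value. Indexing A[j] is pyGetD; in range under Pre_.
def and_helper_py (vector1 : List Int) (vector2 : List Int) : String :=
  let A : List Int := 0 :: vector1
  let B : List Int := 0 :: vector2
  let res : List String :=
    ["(!x" ++ PySem.Int.toStr (PySem.List.pyGetD A 1 0) ++ " | x"
            ++ PySem.Int.toStr (PySem.List.pyGetD B 1 0) ++ ")"]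
  let res := (PySem.List.pyRange 1 (vector1.length : Int) 1).foldl (fun res i =>
      let temp : List String := (PySem.List.pyRange 1 (i + 1) 1).foldl (fun temp j =>
          temp ++ ["(x" ++ PySem.Int.toStr (PySem.List.pyGetD A j 0) ++ " = x"
                         ++ PySem.Int.toStr (PySem.List.pyGetD B j 0) ++ ")"]) []
      let tempS : String := PySem.Str.join " & " temp
      res ++ ["(" ++ tempS ++ " -> (!x" ++ PySem.Int.toStr (PySem.List.pyGetD A (i + 1) 0)
                   ++ " | x" ++ PySem.Int.toStr (PySem.List.pyGetD B (i + 1) 0) ++ "))"]) res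
  "(" ++ PySem.Str.join "\n& " res ++ ")"

-- ===== PORT B =====
def and_helper_py_alt (vector1 : List Int) (vector2 : List Int) : String :=
  let res0 : List String :=
    ["(!x" ++ PySem.Int.toStr (PySem.List.pyGetD vector1 0 0) ++ " | x"
            ++ PySem.Int.toStr (PySem.List.pyGetD vector2 0 0) ++ ")"]
  let p := (PySem.List.pyRange 1 (vector1.length : Int) 1).foldl
      (fun (p : List String × List String) i =>
        let eqs := p.2 ++ ["(x" ++ PySem.Int.toStr (PySem.List.pyGetD vector1 (i - 1) 0) ++ " = x"
                                 ++ PySem.Int.toStr (PySem.List.pyGetD vector2 (i - 1) 0) ++ ")"]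
        (p.1 ++ ["(" ++ PySem.Str.join " & " eqs ++ " -> (!x"
                  ++ PySem.Int.toStr (PySem.List.pyGetD vector1 i 0) ++ " | x"
                  ++ PySem.Int.toStr (PySem.List.pyGetD vector2 i 0) ++ "))"], eqs))
      (res0, [])
  "(" ++ PySem.Str.join "\n& " p.1 ++ ")"

-- ===== PRECONDITION & SPEC =====
-- A raises IndexError on empty vectors and AssertionError (or IndexError) when the
-- lengths differ; Pre_ excludes exactly those inputs.
def Pre_and_helper_py (vector1 : List Int) (vector2 : List Int) : Prop :=
  vector1 ≠ [] ∧ vector1.length = vector2.length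
instance (vector1 : List Int) (vector2 : List Int) : Decidable (Pre_and_helper_py vector1 vector2) := by unfold Pre_and_helper_py; infer_instance
def pvWitness_and_helper_py : List Int × List Int := ([1, 2, 3], [4, 5, 6])

def Spec_and_helper_py (vector1 : List Int) (vector2 : List Int) (out : String) : Prop := out = and_helper_py_alt vector1 vector2
instance (vector1 : List Int) (vector2 : List Int) (out : String) : Decidable (Spec_and_helper_py vector1 vector2 out) := by unfold Spec_and_helper_py; infer_instance

-- ===== CLAIM (what is proved, stated in full; the proofs are below) =====
def Claim_equal_and_helper_py : Prop := ∀ (vector1 : List Int) (vector2 : List Int), Dom_and_helper_py vector1 vector2 → Pre_and_helper_py vector1 vector2 → Spec_and_helper_py vector1 vector2 (and_helper_py vector1 vector2)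

-- ===== LEMMAS AND PROOFS =====

-- the equality term for loop index j (1-based), shared shape of both ports
def pvEt (v1 v2 : List Int) (j : Int) : String :=
  "(x" ++ PySem.Int.toStr (PySem.List.pyGetD v1 (j - 1) 0) ++ " = x"
        ++ PySem.Int.toStr (PySem.List.pyGetD v2 (j - 1) 0) ++ ")"

lemma pvGetD_cons (a : Int) (xs : List Int) (j : Int) (h : 1 ≤ j) :
    PySem.List.pyGetD (a :: xs) j 0 = PySem.List.pyGetD xs (j - 1) 0 := by
  obtain ⟨k, hk⟩ : ∃ k : Nat, j = (k : Int) + 1 := ⟨(j - 1).toNat, by omega⟩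
  subst hk
  have h1 : ((k : Int) + 1) = ((k + 1 : Nat) : Int) := by push_cast; ring
  rw [h1, PySem.List.pyGetD_natCast]
  simp [PySem.List.pyGetD_natCast]

-- A's inner loop computes the prefix of equality terms as a map over the range
lemma pvTemp_eq (v1 v2 : List Int) (n : Int) :
    (PySem.List.pyRange 1 n 1).foldl (fun temp j =>
        temp ++ ["(x" ++ PySem.Int.toStr (PySem.List.pyGetD (0 :: v1) j 0) ++ " = x"
                       ++ PySem.Int.toStr (PySem.List.pyGetD (0 :: v2) j 0) ++ ")"]) []
      = (PySem.List.pyRange 1 n 1).map (pvEt v1 v2) := by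
  rw [PySem.List.foldl_append_singleton_eq_map]
  exact List.map_congr_left (fun j hj => by
    have h1 : (1 : Int) ≤ j := (PySem.List.mem_pyRange_one.mp hj).1
    simp [pvEt, pvGetD_cons _ _ _ h1])

-- the loop invariant: B's pair-fold tracks (A's result list, the prefix of equality terms)
lemma pvLoop (v1 v2 : List Int) (res0 : List String) (k : Nat) :
    (PySem.List.pyRange 1 ((k : Int) + 1) 1).foldl
      (fun (p : List String × List String) i =>
        (p.1 ++ ["(" ++ PySem.Str.join " & "
                    (p.2 ++ ["(x" ++ PySem.Int.toStr (PySem.List.pyGetD v1 (i - 1) 0) ++ " = x"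
                                   ++ PySem.Int.toStr (PySem.List.pyGetD v2 (i - 1) 0) ++ ")"])
                  ++ " -> (!x" ++ PySem.Int.toStr (PySem.List.pyGetD v1 i 0) ++ " | x"
                  ++ PySem.Int.toStr (PySem.List.pyGetD v2 i 0) ++ "))"],
         p.2 ++ ["(x" ++ PySem.Int.toStr (PySem.List.pyGetD v1 (i - 1) 0) ++ " = x"
                       ++ PySem.Int.toStr (PySem.List.pyGetD v2 (i - 1) 0) ++ ")"]))
      (res0, [])
    = ((PySem.List.pyRange 1 ((k : Int) + 1) 1).foldl (fun res i =>
        res ++ ["(" ++ PySem.Str.join " & "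
                    ((PySem.List.pyRange 1 (i + 1) 1).foldl (fun temp j =>
                        temp ++ ["(x" ++ PySem.Int.toStr (PySem.List.pyGetD (0 :: v1) j 0) ++ " = x"
                                       ++ PySem.Int.toStr (PySem.List.pyGetD (0 :: v2) j 0) ++ ")"]) [])
                  ++ " -> (!x" ++ PySem.Int.toStr (PySem.List.pyGetD (0 :: v1) (i + 1) 0)
                  ++ " | x" ++ PySem.Int.toStr (PySem.List.pyGetD (0 :: v2) (i + 1) 0) ++ "))"]) res0,
       (PySem.List.pyRange 1 ((k : Int) + 1) 1).map (pvEt v1 v2)) := by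
  induction k with
  | zero =>
    rw [show ((0 : Nat) : Int) + 1 = 1 by norm_num, PySem.List.pyRange_one_eq_nil le_rfl]
    rfl
  | succ k ih =>
    have hsplit : PySem.List.pyRange 1 (((k + 1 : Nat) : Int) + 1) 1
        = PySem.List.pyRange 1 ((k : Int) + 1) 1 ++ [(k : Int) + 1] := by
      rw [show (((k + 1 : Nat) : Int) + 1) = ((k : Int) + 1) + 1 by push_cast; ring,
          PySem.List.pyRange_one_succ_right (by omega)]
    rw [hsplit, List.foldl_append, List.foldl_append, List.map_append, ih]
    simp only [List.foldl_cons, List.foldl_nil, List.map_cons, List.map_nil]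
    refine Prod.ext ?_ ?_
    · simp only []
      rw [pvTemp_eq v1 v2 ((k : Int) + 1 + 1),
          PySem.List.pyRange_one_succ_right (show (1 : Int) ≤ (k : Int) + 1 by omega),
          List.map_append,
          pvGetD_cons _ _ _ (show (1 : Int) ≤ (k : Int) + 1 + 1 by omega)]
      rw [show PySem.List.pyGetD (0 :: v2) ((k : Int) + 1 + 1) 0
            = PySem.List.pyGetD v2 ((k : Int) + 1 + 1 - 1) 0 from
          pvGetD_cons _ _ _ (by omega)]
      norm_num [pvEt]
    · norm_num [pvEt]

-- ===== VERDICT (by name: the statement is the Claim_ definition above) =====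
theorem and_helper_py_spec : Claim_equal_and_helper_py := by
  intro v1 v2 _ hpre
  show and_helper_py v1 v2 = and_helper_py_alt v1 v2
  rcases v1 with _ | ⟨a, t⟩
  · exact absurd rfl hpre.1
  · have hhead : PySem.List.pyGetD ((0:Int) :: a :: t) 1 0 = PySem.List.pyGetD (a :: t) 0 0 := by
      rw [pvGetD_cons _ _ _ le_rfl]; norm_num
    have hhead2 : PySem.List.pyGetD ((0:Int) :: v2) 1 0 = PySem.List.pyGetD v2 0 0 := by
      rw [pvGetD_cons _ _ _ le_rfl]; norm_num
    simp only [and_helper_py, and_helper_py_alt, List.length_cons, Nat.cast_add, Nat.cast_one,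
      hhead, hhead2]
    rw [pvLoop (a :: t) v2 _ t.length]
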